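-- pv_equiv track=rewrite | github.com/cristianosalvati/PromptChess | off_catalog.py | find_best_matches
-- ===== SOURCE A (Python) =====
-- def find_best_matches(query_words, categories):
--     """Ritorna le categorie che contengono il maggior numero di parole di query."""
--     scores = {}
--     for cat in categories:
--         words = cat.split('-')
--         match_count = sum(1 for w in query_words if w.lower() in words)
--         if match_count > 0:
--             scores.setdefault(match_count, []).append(cat)
--     if not scores:
--         return []
--     max_score = max(scores)
--     return scores[max_score]
-- ===== SOURCE B (Python) =====
-- def find_best_matches(query_words, categories):
--     """Ritorna le categorie che contengono il maggior numero di parole di query."""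
--     lowered = [w.lower() for w in query_words]
--     best = 0
--     winners = []
--     for cat in categories:
--         words = set(cat.split('-'))
--         score = sum(1 for w in lowered if w in words)
--         if score > best:
--             best = score
--             winners = [cat]
--         elif score == best and best > 0:
--             winners.append(cat)
--     return winners
-- ===== Notes on version B (the rewrite author's own statement) =====
-- stated objective: alternative
-- what changed: Replaces A's two-stage scheme (a dict grouping categories by match count, then max over the keys and a dict lookup) with a single left-to-right pass that keeps a running best score and the current winners list, resetting the list when a higher score appears and appending on ties; query words are lowercased once and each category's words are held in a set for membership.
import Mathlib
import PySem

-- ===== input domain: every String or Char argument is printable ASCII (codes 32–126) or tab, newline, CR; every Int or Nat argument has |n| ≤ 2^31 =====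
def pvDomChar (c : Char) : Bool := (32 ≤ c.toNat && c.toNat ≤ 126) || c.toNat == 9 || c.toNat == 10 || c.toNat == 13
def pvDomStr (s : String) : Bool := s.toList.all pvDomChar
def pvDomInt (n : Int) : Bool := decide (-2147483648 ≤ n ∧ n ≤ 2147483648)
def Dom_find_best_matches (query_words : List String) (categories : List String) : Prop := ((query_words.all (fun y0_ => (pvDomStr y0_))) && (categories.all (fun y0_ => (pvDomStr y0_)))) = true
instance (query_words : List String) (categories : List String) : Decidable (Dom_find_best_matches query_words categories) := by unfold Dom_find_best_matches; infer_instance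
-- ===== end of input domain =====

-- B replaces A's two-stage scheme (count-keyed dict of groups, then max over keys and a lookup)
-- by ONE left-to-right pass keeping a running best score and the current winners list
-- (reset on a strictly better score, append on a positive tie); objective: alternative.


-- ===== PORT A =====
-- loop body of A's for-loop; split? is some (sep "-" ≠ ""); scores.setdefault(mc, []).append(cat) is Dict.modify mc [] (· ++ [cat])
def pvStepA (query_words : List String) (d : PySem.Dict Int (List String)) (cat : String) : PySem.Dict Int (List String) :=
  let words := ((PySem.Str.split? cat "-").getD [])
  let match_count : Int :=
    query_words.foldl (fun acc w => if words.contains (PySem.Str.lower w) then acc + 1 else acc) 0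
  if match_count > 0 then d.modify match_count [] (fun l => l ++ [cat]) else d

def find_best_matches (query_words : List String) (categories : List String) : List String :=
  let scores := categories.foldl (pvStepA query_words) PySem.Dict.empty
  if scores.keys.isEmpty then []
  else
    -- max(scores) over the keys; scores[max_score] never raises (the key is present), so getD is exact here
    match PySem.List.max? scores.keys (fun x => x) with
    | some max_score => scores.getD max_score []
    | none => []

-- ===== PORT B =====
-- B's per-category score: sum(1 for w in lowered if w in words), words a set
def pvScoreB (lowered : List String) (cat : String) : Int :=
  let words : PySem.Set String := PySem.Set.ofList ((PySem.Str.split? cat "-").getD [])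
  lowered.foldl (fun acc w => if words.contains w then acc + 1 else acc) 0

-- B's loop body over the state (best, winners)
def pvStepB (lowered : List String) (st : Int × List String) (cat : String) : Int × List String :=
  let score := pvScoreB lowered cat
  if score > st.1 then (score, [cat])
  else if score = st.1 ∧ st.1 > 0 then (st.1, st.2 ++ [cat])
  else st

def find_best_matches_alt (query_words : List String) (categories : List String) : List String :=
  let lowered := query_words.map PySem.Str.lower
  (categories.foldl (pvStepB lowered) (0, [])).2

-- ===== PRECONDITION & SPEC =====
def Spec_find_best_matches (query_words : List String) (categories : List String) (out : List String) : Prop := out = find_best_matches_alt query_words categories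
instance (query_words : List String) (categories : List String) (out : List String) : Decidable (Spec_find_best_matches query_words categories out) := by unfold Spec_find_best_matches; infer_instance

-- ===== CLAIM (what is proved, stated in full; the proofs are below) =====
def Claim_equal_find_best_matches : Prop := ∀ (query_words : List String) (categories : List String), Dom_find_best_matches query_words categories → Spec_find_best_matches query_words categories (find_best_matches query_words categories)

-- ===== LEMMAS AND PROOFS =====

-- A's score of a category, as used inside pvStepA
def pvScore (query_words : List String) (cat : String) : Int :=
  query_words.foldl
    (fun acc w => if (((PySem.Str.split? cat "-").getD [])).contains (PySem.Str.lower w) then acc + 1 else acc) 0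

-- the counting loop only grows its accumulator
theorem pv_foldl_count_ge (p : String → Bool) (l : List String) (acc : Int) :
    acc ≤ l.foldl (fun a w => if p w then a + 1 else a) acc := by
  induction l generalizing acc with
  | nil => simp
  | cons x t ih =>
    simp only [List.foldl_cons]
    by_cases h : p x
    · simp only [h, if_pos]
      exact le_trans (by omega) (ih (acc + 1))
    · simp only [h, if_neg, Bool.false_eq_true, not_false_iff]
      exact ih acc

theorem pvScore_nonneg (qws : List String) (cat : String) : 0 ≤ pvScore qws cat :=
  pv_foldl_count_ge _ qws 0

-- membership in the dedup set is membership in the raw word list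
theorem pv_set_contains (ws : List String) (x : String) :
    (PySem.Set.ofList ws).contains x = ws.contains x := by
  by_cases h : x ∈ ws
  · simp [PySem.Set.mem_ofList, h]
  · simp [PySem.Set.mem_ofList, h]

-- B's score on the precomputed lowered list is A's score
theorem pvScoreB_eq (qws : List String) (cat : String) :
    pvScoreB (qws.map PySem.Str.lower) cat = pvScore qws cat := by
  unfold pvScoreB pvScore
  rw [List.foldl_map]
  apply PySem.List.foldl_congr_mem
  intro acc w _
  rw [pv_set_contains]

-- A's loop body with its lets reduced is pvScore
theorem pvStepA_eq (qws : List String) (d : PySem.Dict Int (List String)) (cat : String) :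
    pvStepA qws d cat =
      if pvScore qws cat > 0 then d.modify (pvScore qws cat) [] (fun l => l ++ [cat]) else d := rfl

-- value stored under a positive key after A's loop
theorem pv_getD_fold (qws : List String) (cats : List String)
    (d : PySem.Dict Int (List String)) (k : Int) (hk : 0 < k) :
    (cats.foldl (pvStepA qws) d).getD k [] =
      d.getD k [] ++ cats.filter (fun c => pvScore qws c == k) := by
  induction cats generalizing d with
  | nil => simp
  | cons c t ih =>
    simp only [List.foldl_cons, List.filter_cons, pvStepA_eq]
    by_cases hpos : pvScore qws c > 0
    · rw [if_pos hpos, ih, PySem.Dict.getD_modify]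
      by_cases he : pvScore qws c = k
      · rw [if_pos he.symm]
        simp [he, List.append_assoc]
      · rw [if_neg (fun h => he h.symm)]
        simp [he]
    · rw [if_neg hpos, ih]
      have hne : (pvScore qws c == k) = false :=
        beq_eq_false_iff_ne.mpr (by omega)
      simp [hne]

-- key membership after A's loop
theorem pv_mem_keys_fold (qws : List String) (cats : List String)
    (d : PySem.Dict Int (List String)) (k : Int) :
    k ∈ (cats.foldl (pvStepA qws) d).keys ↔
      k ∈ d.keys ∨ ∃ c ∈ cats, 0 < pvScore qws c ∧ pvScore qws c = k := by
  induction cats generalizing d with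
  | nil => simp
  | cons c t ih =>
    simp only [List.foldl_cons, pvStepA_eq, List.mem_cons]
    by_cases hpos : pvScore qws c > 0
    · rw [if_pos hpos, ih]
      have hmem : k ∈ (d.modify (pvScore qws c) [] (fun l => l ++ [c])).keys ↔
          k = pvScore qws c ∨ k ∈ d.keys := by
        rw [← PySem.Dict.contains_iff_mem_keys, PySem.Dict.contains_modify]
        simp [PySem.Dict.contains_iff_mem_keys]
      rw [hmem]
      constructor
      · rintro ((rfl | h) | ⟨x, hx, h1, h2⟩)
        · exact Or.inr ⟨c, Or.inl rfl, hpos, rfl⟩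
        · exact Or.inl h
        · exact Or.inr ⟨x, Or.inr hx, h1, h2⟩
      · rintro (h | ⟨x, (rfl | hx), h1, h2⟩)
        · exact Or.inl (Or.inr h)
        · exact Or.inl (Or.inl h2.symm)
        · exact Or.inr ⟨x, hx, h1, h2⟩
    · rw [if_neg hpos, ih]
      constructor
      · rintro (h | ⟨x, hx, h1, h2⟩)
        · exact Or.inl h
        · exact Or.inr ⟨x, Or.inr hx, h1, h2⟩
      · rintro (h | ⟨x, (rfl | hx), h1, h2⟩)
        · exact Or.inl h
        · exact absurd h1 hpos
        · exact Or.inr ⟨x, hx, h1, h2⟩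

-- running best over a suffix, as a fold of max over A's scores
def pvBest (qws : List String) (cats : List String) (b : Int) : Int :=
  cats.foldl (fun m c => max m (pvScore qws c)) b

-- characterization of B's single pass from any state (b, w) with 0 ≤ b
theorem pv_foldB (qws : List String) (cats : List String) :
    ∀ (b : Int) (w : List String), 0 ≤ b →
    cats.foldl (pvStepB (qws.map PySem.Str.lower)) (b, w) =
      (pvBest qws cats b,
       if b < pvBest qws cats b then cats.filter (fun c => pvScore qws c == pvBest qws cats b)
       else if 0 < pvBest qws cats b then w ++ cats.filter (fun c => pvScore qws c == pvBest qws cats b)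
       else w) := by
  induction cats with
  | nil =>
    intro b w hb
    simp [pvBest]
  | cons c t ih =>
    intro b w hb
    have hs0 : 0 ≤ pvScore qws c := pvScore_nonneg qws c
    have hstep : pvStepB (qws.map PySem.Str.lower) (b, w) c =
        if pvScore qws c > b then (pvScore qws c, [c])
        else if pvScore qws c = b ∧ b > 0 then (b, w ++ [c])
        else (b, w) := by
      simp [pvStepB, pvScoreB_eq]
    have hBdef : pvBest qws (c :: t) b = pvBest qws t (max b (pvScore qws c)) := by
      simp [pvBest]
    -- bounds on the fold of max
    have hmono : ∀ (a : Int), a ≤ pvBest qws t a ∧ ∀ x ∈ t, pvScore qws x ≤ pvBest qws t a := by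
      intro a
      exact PySem.List.le_foldl_max_int t (pvScore qws) a
    simp only [List.foldl_cons, hstep]
    by_cases h1 : pvScore qws c > b
    · rw [if_pos h1, ih (pvScore qws c) [c] hs0]
      have hmax : max b (pvScore qws c) = pvScore qws c := by omega
      rw [hBdef, hmax]
      have hle := (hmono (pvScore qws c)).1
      by_cases h2 : pvScore qws c < pvBest qws t (pvScore qws c)
      · rw [if_pos h2, if_pos (by omega), List.filter_cons_of_neg]
        simp only [beq_iff_eq]
        omega
      · have hBe : pvBest qws t (pvScore qws c) = pvScore qws c := by omega
        rw [if_neg h2, if_pos (by omega), if_pos (by omega), List.filter_cons_of_pos]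
        · simp [hBe]
        · simp only [beq_iff_eq]; omega
    · rw [if_neg h1]
      have hmax : max b (pvScore qws c) = b := by omega
      rw [hBdef, hmax] at *
      have hle := (hmono b).1
      by_cases h2 : pvScore qws c = b ∧ b > 0
      · rw [if_pos h2, ih b (w ++ [c]) hb]
        by_cases h3 : b < pvBest qws t b
        · rw [if_pos h3, if_pos h3, List.filter_cons_of_neg]
          simp only [beq_iff_eq]
          omega
        · rw [if_neg h3, if_neg h3, if_pos (by omega), if_pos (by omega),
            List.filter_cons_of_pos]
          · simp
          · simp only [beq_iff_eq]
            omega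
      · rw [if_neg h2, ih b w hb]
        by_cases h3 : b < pvBest qws t b
        · rw [if_pos h3, if_pos h3, List.filter_cons_of_neg]
          simp only [beq_iff_eq]
          omega
        · rw [if_neg h3, if_neg h3]
          by_cases h4 : 0 < pvBest qws t b
          · rw [if_pos h4, if_pos h4, List.filter_cons_of_neg]
            simp only [beq_iff_eq]
            omega
          · rw [if_neg h4, if_neg h4]

-- the overall best from 0 is attained or zero, and bounds every score
theorem pvBest_bounds (qws : List String) (cats : List String) :
    (0 ≤ pvBest qws cats 0 ∧ ∀ c ∈ cats, pvScore qws c ≤ pvBest qws cats 0) ∧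
      (pvBest qws cats 0 = 0 ∨ ∃ c ∈ cats, pvScore qws c = pvBest qws cats 0) := by
  have h := PySem.List.le_foldl_max_int cats (pvScore qws) 0
  refine ⟨⟨h.1, h.2⟩, ?_⟩
  have hmem : pvBest qws cats 0 = (cats.map (pvScore qws)).foldl max 0 := by
    rw [List.foldl_map]
    rfl
  rcases PySem.List.foldl_max_mem (cats.map (pvScore qws)) 0 with he | hin
  · exact Or.inl (by rw [hmem]; exact he)
  · right
    rw [hmem] at *
    obtain ⟨c, hc, hsc⟩ := List.mem_map.mp hin
    exact ⟨c, hc, hsc⟩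

-- ===== VERDICT (by name: the statement is the Claim_ definition above) =====
theorem find_best_matches_spec : Claim_equal_find_best_matches := by
  intro qws cats _
  unfold Spec_find_best_matches find_best_matches find_best_matches_alt
  dsimp only
  rw [pv_foldB qws cats 0 [] le_rfl]
  obtain ⟨⟨hB0, hBub⟩, hatt⟩ := pvBest_bounds qws cats
  by_cases hex : ∃ c ∈ cats, 0 < pvScore qws c
  · obtain ⟨c0, hc0, hpos0⟩ := hex
    have hBpos : 0 < pvBest qws cats 0 := lt_of_lt_of_le hpos0 (hBub c0 hc0)
    -- A's keys list is nonempty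
    have hk0 : pvScore qws c0 ∈ (cats.foldl (pvStepA qws) PySem.Dict.empty).keys := by
      rw [pv_mem_keys_fold]
      exact Or.inr ⟨c0, hc0, hpos0, rfl⟩
    have hne : (cats.foldl (pvStepA qws) PySem.Dict.empty).keys ≠ [] :=
      fun h => by simp [h] at hk0
    rw [if_neg (by simpa [List.isEmpty_iff] using hne)]
    obtain ⟨m, hm⟩ : ∃ m, PySem.List.max? (cats.foldl (pvStepA qws) PySem.Dict.empty).keys
        (fun x => x) = some m := by
      cases hmax : PySem.List.max? (cats.foldl (pvStepA qws) PySem.Dict.empty).keys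
          (fun x => x) with
      | none => exact absurd ((PySem.List.max?_eq_none_iff _ _).mp hmax) hne
      | some m => exact ⟨m, rfl⟩
    rw [hm]
    dsimp only
    -- m is a positive score of some category, hence m ≤ pvBest
    have hm_mem := PySem.List.max?_mem hm
    rw [pv_mem_keys_fold] at hm_mem
    rcases hm_mem with hbad | ⟨cm, hcm, hmpos, hms⟩
    · exact absurd hbad (by simp)
    have h1 : m ≤ pvBest qws cats 0 := hms ▸ hBub cm hcm
    -- pvBest is attained (it is positive) hence a key, so pvBest ≤ m
    have h2 : pvBest qws cats 0 ≤ m := by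
      rcases hatt with hz | ⟨cb, hcb, hsb⟩
      · omega
      · have hmk : pvBest qws cats 0 ∈ (cats.foldl (pvStepA qws) PySem.Dict.empty).keys := by
          rw [pv_mem_keys_fold]
          exact Or.inr ⟨cb, hcb, hsb ▸ hBpos, hsb⟩
        have := PySem.List.max?_isMax hm _ hmk
        simpa using this
    have hmm : m = pvBest qws cats 0 := le_antisymm h1 h2
    rw [pv_getD_fold qws cats PySem.Dict.empty m (by omega)]
    rw [PySem.Dict.getD_empty, List.nil_append, if_pos (by omega), hmm]
  · -- no positive score: A's dict stays empty, B's best is 0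
    push Not at hex
    have hBz : pvBest qws cats 0 = 0 := by
      rcases hatt with hz | ⟨cb, hcb, hsb⟩
      · exact hz
      · have := hex cb hcb
        omega
    have hkeys : (cats.foldl (pvStepA qws) PySem.Dict.empty).keys = [] := by
      apply List.eq_nil_iff_forall_not_mem.mpr
      intro k hk
      rw [pv_mem_keys_fold] at hk
      rcases hk with h | ⟨c, hc, h1, _⟩
      · simp at h
      · exact absurd h1 (not_lt.mpr (hex c hc))
    rw [if_pos (by simp [hkeys]), hBz, if_neg (by omega), if_neg (by omega)]
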